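-- pv_equiv track=rewrite | github.com/andreahn/advent-of-code | 2023/15/day15.py | hashAlg
-- ===== SOURCE A (Python) =====
-- def hashAlg(str):
--     res = 0
--     for c in str:
--         asciiVal = ord(c)
--         res += asciiVal
--         res *= 17
--         res %= 256
--     return res
-- ===== SOURCE B (Python) =====
-- def hashAlg(str):
--     return sum(ord(c) * pow(17, k + 1, 256) for k, c in enumerate(reversed(str))) % 256
-- ===== Notes on version B (the rewrite author's own statement) =====
-- stated objective: alternative
-- what changed: Replaces the dependent running update (add, scale by 17, reduce mod 256 each step) by a closed-form weighted sum: the k-th character from the end contributes ord(c)*pow(17,k+1,256), summed once and reduced mod 256 at the end.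
import Mathlib
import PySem

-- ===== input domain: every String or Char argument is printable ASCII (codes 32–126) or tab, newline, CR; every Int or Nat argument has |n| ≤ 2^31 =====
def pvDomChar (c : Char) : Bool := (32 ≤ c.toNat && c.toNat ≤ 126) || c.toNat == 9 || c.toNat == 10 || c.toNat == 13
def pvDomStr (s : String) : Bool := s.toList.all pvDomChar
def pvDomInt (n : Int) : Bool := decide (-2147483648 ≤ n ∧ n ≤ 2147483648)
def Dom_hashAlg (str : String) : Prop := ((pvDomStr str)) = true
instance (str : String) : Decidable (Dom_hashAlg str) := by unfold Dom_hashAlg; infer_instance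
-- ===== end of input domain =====

-- B replaces A's dependent running update by a closed-form weighted sum over the reversed string (same O(n) cost, different decomposition).

-- ===== PORT A =====
-- for c in str: res += ord(c); res *= 17; res %= 256
def hashAlg (str : String) : Int :=
  str.toList.foldl (fun res c => PySem.Int.mod ((res + (c.toNat : Int)) * 17) 256) 0

-- ===== PORT B =====
-- sum(ord(c) * pow(17, k + 1, 256) for k, c in enumerate(reversed(str))) % 256
def hashAlg_alt (str : String) : Int :=
  PySem.Int.mod
    (((PySem.List.enumerate str.toList.reverse 0).map
        (fun p => (p.2.toNat : Int) * PySem.Int.mod ((17 : Int) ^ (p.1 + 1).toNat) 256)).sum)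
    256

-- ===== PRECONDITION & SPEC =====
def Spec_hashAlg (str : String) (out : Int) : Prop := out = hashAlg_alt str
instance (str : String) (out : Int) : Decidable (Spec_hashAlg str out) := by unfold Spec_hashAlg; infer_instance

-- ===== CLAIM (what is proved, stated in full; the proofs are below) =====
def Claim_equal_hashAlg : Prop := ∀ (str : String), Dom_hashAlg str → Spec_hashAlg str (hashAlg str)

-- ===== LEMMAS AND PROOFS =====

-- weighted polynomial value of the string: head of an (m+1)-char tail weighs 17^(m+1)
def pvS : List Char → Int
  | [] => 0
  | c :: t => (c.toNat : Int) * 17 ^ (t.length + 1) + pvS t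

-- A's fold stays in [0, 256)
lemma pv_fold_bounds (l : List Char) (r : Int) (h0 : 0 ≤ r) (h1 : r < 256) :
    0 ≤ l.foldl (fun res c => PySem.Int.mod ((res + (c.toNat : Int)) * 17) 256) r ∧
      l.foldl (fun res c => PySem.Int.mod ((res + (c.toNat : Int)) * 17) 256) r < 256 := by
  induction l generalizing r with
  | nil => exact ⟨h0, h1⟩
  | cons c t ih =>
      simp only [List.foldl_cons]
      refine ih _ ?_ ?_
      · rw [PySem.Int.mod_eq_emod_of_pos (by norm_num)]
        exact Int.emod_nonneg _ (by norm_num)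
      · rw [PySem.Int.mod_eq_emod_of_pos (by norm_num)]
        exact Int.emod_lt_of_pos _ (by norm_num)

-- A's fold mod 256 equals the seed-weighted polynomial mod 256
lemma pv_fold_key (l : List Char) (r : Int) :
    (l.foldl (fun res c => PySem.Int.mod ((res + (c.toNat : Int)) * 17) 256) r) % 256
      = (r * 17 ^ l.length + pvS l) % 256 := by
  induction l generalizing r with
  | nil => simp [pvS]
  | cons c t ih =>
      rw [List.foldl_cons, ih, PySem.Int.mod_eq_emod_of_pos (by norm_num : (0:Int) < 256)]
      have hx : ((r + (c.toNat : Int)) * 17) % 256 ≡ (r + (c.toNat : Int)) * 17 [ZMOD 256] :=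
        Int.emod_emod_of_dvd _ dvd_rfl
      have h := (hx.mul_right ((17 : Int) ^ t.length)).add_right (pvS t)
      rw [h]
      have : (r + (c.toNat : Int)) * 17 * 17 ^ t.length + pvS t
          = r * 17 ^ (t.length + 1) + pvS (c :: t) := by
        simp [pvS]; ring
      rw [this]
      simp [pvS]

-- B's sum mod 256 equals the polynomial mod 256
lemma pv_sum_key (l : List Char) :
    (((PySem.List.enumerate l.reverse 0).map
        (fun p => (p.2.toNat : Int) * PySem.Int.mod ((17 : Int) ^ (p.1 + 1).toNat) 256)).sum) % 256
      = pvS l % 256 := by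
  induction l with
  | nil => simp [pvS]
  | cons c t ih =>
      rw [List.reverse_cons, PySem.List.enumerate_append]
      simp only [List.map_append, List.sum_append, List.length_reverse]
      have hterm : ((PySem.List.enumerate [c] (0 + (t.length : Int))).map
          (fun p => (p.2.toNat : Int) * PySem.Int.mod ((17 : Int) ^ (p.1 + 1).toNat) 256)).sum
          = (c.toNat : Int) * PySem.Int.mod ((17 : Int) ^ (t.length + 1)) 256 := by
        simp [PySem.List.enumerate]
      rw [hterm, PySem.Int.mod_eq_emod_of_pos (by norm_num : (0:Int) < 256)]
      have hw : ((17 : Int) ^ (t.length + 1)) % 256 ≡ (17 : Int) ^ (t.length + 1) [ZMOD 256] :=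
        Int.emod_emod_of_dvd _ dvd_rfl
      have hIH : (((PySem.List.enumerate t.reverse 0).map
          (fun p => (p.2.toNat : Int) * PySem.Int.mod ((17 : Int) ^ (p.1 + 1).toNat) 256)).sum)
          ≡ pvS t [ZMOD 256] := ih
      have h := hIH.add (hw.mul_left (c.toNat : Int))
      rw [h, Int.add_comm]
      simp [pvS]

-- ===== VERDICT (by name: the statement is the Claim_ definition above) =====
theorem hashAlg_spec : Claim_equal_hashAlg := by
  intro str _
  unfold Spec_hashAlg hashAlg hashAlg_alt
  rw [PySem.Int.mod_eq_emod_of_pos (by norm_num : (0:Int) < 256), pv_sum_key]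
  have hb := pv_fold_bounds str.toList 0 le_rfl (by norm_num)
  have := pv_fold_key str.toList 0
  rw [Int.emod_eq_of_lt hb.1 hb.2] at this
  rw [this]
  simp
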